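-- pv_equiv track=rewrite | github.com/ihmcrobotics/ihmc-open-robotics-software | ihmc-perception/python/plogs/footstep_generator.py | generate_footstep_sequences
-- ===== SOURCE A (Python) =====
-- def generate_footstep_sequences(grid_size):
--     sequences = []
--     for x1 in range(grid_size):
--         for y1 in range(grid_size):
--             for x2 in range(grid_size):
--                 for y2 in range(grid_size):
--                     for x3 in range(grid_size):
--                         for y3 in range(grid_size):
--                             sequence = [(x1, y1), (x2, y2), (x3, y3)]
--                             sequences.append(sequence)
--     return sequences
-- ===== SOURCE B (Python) =====
-- def generate_footstep_sequences(grid_size):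
--     n = grid_size
--     if n <= 0:
--         return []
--     sequences = []
--     for code in range(n ** 6):
--         code, y3 = divmod(code, n)
--         code, x3 = divmod(code, n)
--         code, y2 = divmod(code, n)
--         code, x2 = divmod(code, n)
--         x1, y1 = divmod(code, n)
--         sequences.append([(x1, y1), (x2, y2), (x3, y3)])
--     return sequences
-- ===== Notes on version B (the rewrite author's own statement) =====
-- stated objective: alternative
-- what changed: Replaces the six nested enumeration loops with a single loop over range(n**6) that decodes each rank into six base-n digits by repeated divmod (rank unranking instead of nested enumeration).
import Mathlib
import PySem

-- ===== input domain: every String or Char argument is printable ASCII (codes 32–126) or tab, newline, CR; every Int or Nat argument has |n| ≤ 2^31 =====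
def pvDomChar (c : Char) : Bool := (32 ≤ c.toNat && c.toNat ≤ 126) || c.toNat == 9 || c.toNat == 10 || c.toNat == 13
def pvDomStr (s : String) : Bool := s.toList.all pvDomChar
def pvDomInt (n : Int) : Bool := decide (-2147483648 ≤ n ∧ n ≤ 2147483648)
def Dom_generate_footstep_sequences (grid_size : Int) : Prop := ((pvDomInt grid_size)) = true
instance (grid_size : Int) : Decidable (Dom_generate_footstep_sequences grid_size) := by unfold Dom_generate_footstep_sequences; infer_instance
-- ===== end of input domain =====

-- B replaces the six nested loops by a single loop over range(n**6) that unranks each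
-- index into six base-n digits via repeated divmod (objective: alternative algorithm).


-- ===== PORT A =====
def generate_footstep_sequences (grid_size : Int) : List (List (Int × Int)) :=
  (PySem.List.pyRange 0 grid_size 1).foldl (fun sequences x1 =>
    (PySem.List.pyRange 0 grid_size 1).foldl (fun sequences y1 =>
      (PySem.List.pyRange 0 grid_size 1).foldl (fun sequences x2 =>
        (PySem.List.pyRange 0 grid_size 1).foldl (fun sequences y2 =>
          (PySem.List.pyRange 0 grid_size 1).foldl (fun sequences x3 =>
            (PySem.List.pyRange 0 grid_size 1).foldl (fun sequences y3 =>
              sequences ++ [[(x1, y1), (x2, y2), (x3, y3)]]) sequences) sequences) sequences) sequences) sequences) []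

-- ===== PORT B =====
def generate_footstep_sequences_alt (grid_size : Int) : List (List (Int × Int)) :=
  let n := grid_size
  if n ≤ 0 then []
  else
    (PySem.List.pyRange 0 (n ^ 6) 1).foldl (fun sequences code =>
      let c1 := PySem.Int.floordiv code n; let y3 := PySem.Int.mod code n
      let c2 := PySem.Int.floordiv c1 n;   let x3 := PySem.Int.mod c1 n
      let c3 := PySem.Int.floordiv c2 n;   let y2 := PySem.Int.mod c2 n
      let c4 := PySem.Int.floordiv c3 n;   let x2 := PySem.Int.mod c3 n
      let x1 := PySem.Int.floordiv c4 n;   let y1 := PySem.Int.mod c4 n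
      sequences ++ [[(x1, y1), (x2, y2), (x3, y3)]]) []

-- ===== PRECONDITION & SPEC =====
def Spec_generate_footstep_sequences (grid_size : Int) (out : List (List (Int × Int))) : Prop := out = generate_footstep_sequences_alt grid_size
instance (grid_size : Int) (out : List (List (Int × Int))) : Decidable (Spec_generate_footstep_sequences grid_size out) := by unfold Spec_generate_footstep_sequences; infer_instance

-- ===== CLAIM (what is proved, stated in full; the proofs are below) =====
def Claim_equal_generate_footstep_sequences : Prop := ∀ (grid_size : Int), Dom_generate_footstep_sequences grid_size → Spec_generate_footstep_sequences grid_size (generate_footstep_sequences grid_size)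

-- ===== LEMMAS AND PROOFS =====

-- peeling the least-significant base-b digit off range (a*b)
lemma pv_range_mul_flatMap {α : Type} (b : Nat) (hb : 0 < b) (a : Nat) (g : Nat → Nat → List α) :
    (List.range (a * b)).flatMap (fun i => g (i / b) (i % b))
      = (List.range a).flatMap (fun x => (List.range b).flatMap (fun y => g x y)) := by
  induction a with
  | zero => simp
  | succ a ih =>
    rw [Nat.succ_mul, List.range_add, List.flatMap_append, ih, List.range_succ,
      List.flatMap_append, List.flatMap_singleton]
    congr 1
    rw [List.flatMap_map]
    refine List.flatMap_congr (fun y hy => ?_)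
    have hylt : y < b := List.mem_range.mp hy
    have h1 : (a * b + y) / b = a := by
      rw [Nat.mul_comm, Nat.mul_add_div hb, Nat.div_eq_of_lt hylt]
      omega
    have h2 : (a * b + y) % b = y := by
      rw [Nat.mul_comm, Nat.mul_add_mod, Nat.mod_eq_of_lt hylt]
    simp [h1, h2]


-- six-fold unranking: a single scan of range (m^6) with repeated divmod equals the nested product
lemma pv_unrank6 {α : Type} (m : Nat) (hm : 0 < m) (F : Nat → Nat → Nat → Nat → Nat → Nat → List α) :
    (List.range (m ^ 6)).flatMap (fun i =>
        F (i / m / m / m / m / m) (i / m / m / m / m % m) (i / m / m / m % m)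
          (i / m / m % m) (i / m % m) (i % m))
      = (List.range m).flatMap (fun x1 => (List.range m).flatMap (fun y1 =>
          (List.range m).flatMap (fun x2 => (List.range m).flatMap (fun y2 =>
            (List.range m).flatMap (fun x3 => (List.range m).flatMap (fun y3 =>
              F x1 y1 x2 y2 x3 y3)))))) := by
  rw [show m ^ 6 = m ^ 5 * m from by ring,
    pv_range_mul_flatMap m hm (m ^ 5) (fun c y3 =>
      F (c / m / m / m / m) (c / m / m / m % m) (c / m / m % m) (c / m % m) (c % m) y3),
    show m ^ 5 = m ^ 4 * m from by ring,
    pv_range_mul_flatMap m hm (m ^ 4) (fun c x3 => (List.range m).flatMap (fun y3 =>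
      F (c / m / m / m) (c / m / m % m) (c / m % m) (c % m) x3 y3)),
    show m ^ 4 = m ^ 3 * m from by ring,
    pv_range_mul_flatMap m hm (m ^ 3) (fun c y2 => (List.range m).flatMap (fun x3 =>
      (List.range m).flatMap (fun y3 => F (c / m / m) (c / m % m) (c % m) y2 x3 y3))),
    show m ^ 3 = m ^ 2 * m from by ring,
    pv_range_mul_flatMap m hm (m ^ 2) (fun c x2 => (List.range m).flatMap (fun y2 =>
      (List.range m).flatMap (fun x3 => (List.range m).flatMap (fun y3 =>
        F (c / m) (c % m) x2 y2 x3 y3)))),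
    show m ^ 2 = m * m from by ring,
    pv_range_mul_flatMap m hm m (fun c y1 => (List.range m).flatMap (fun x2 =>
      (List.range m).flatMap (fun y2 => (List.range m).flatMap (fun x3 =>
        (List.range m).flatMap (fun y3 => F c y1 x2 y2 x3 y3)))))]

-- ===== VERDICT (by name: the statement is the Claim_ definition above) =====
theorem generate_footstep_sequences_spec : Claim_equal_generate_footstep_sequences := by
  intro n _
  unfold Spec_generate_footstep_sequences generate_footstep_sequences generate_footstep_sequences_alt
  by_cases hn : n ≤ 0
  · simp [hn]
  · simp only [if_neg hn]
    rw [not_le] at hn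
    obtain ⟨m, rfl⟩ : ∃ m : Nat, n = (m : Int) := ⟨n.toNat, (Int.toNat_of_nonneg hn.le).symm⟩
    have hm : 0 < m := by exact_mod_cast hn
    have hcast : ((m : Int) ^ 6) = ((m ^ 6 : Nat) : Int) := by push_cast; ring
    rw [hcast]
    simp only [PySem.List.foldl_append_eq_flatMap, List.nil_append,
      PySem.List.pyRange_one, Int.sub_zero, Int.toNat_natCast, List.flatMap_map]
    simp only [PySem.Int.floordiv_natCast, PySem.Int.mod_natCast, zero_add]
    rw [pv_unrank6 m hm (fun x1 y1 x2 y2 x3 y3 =>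
      [[((x1 : Int), (y1 : Int)), ((x2 : Int), (y2 : Int)), ((x3 : Int), (y3 : Int))]])]
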